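-- pv_equiv track=rewrite | github.com/idaholab/raven | scripts/fix_raven_docstrings.py | trimQuoteDocstring
-- ===== SOURCE A (Python) =====
-- def trimQuoteDocstring(docstring, quoteIndent, maxColumns=120):
--   """
--     This method is aimed to trim to the quote docstrings to the
--     be limited in the maxColumns number
--     @ In, docstring, str, the docstring that need to be modified
--     @ In, quoteIndent, int, the indentation number of columns of the docstring
--     @ In, maxColumns, int, optional, the maximum number of columns allowed (default 120)
--     @ Out, outputLines, list, the list of new lines that need to be inserted
--   """
--   lines = [elm.expandtabs() for elm in docstring]
--   outputLines = [" "*quoteIndent+'"""'+"\n"]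
--   # find if "@" are present
--   inIndex = []
--   outIndex = []
--   for cnt, line in enumerate(lines):
--     if line.strip().startswith("@"):
--       if "@ in" in line.lower() or '@in' in line.lower():
--         inIndex.append(cnt)
--       elif "@ out" in line.lower() or '@out' in line.lower():
--         outIndex.append(cnt)
--   for cnt, line in enumerate(lines):
--     indentedLine = " "*(quoteIndent+2) + line.lstrip()
--     if cnt in inIndex+outIndex:
--       indentedLine = indentedLine.replace("@Out","@ Out").replace("@In","@ In")
--       breakIndex = [i for i, ltr in enumerate(indentedLine) if ltr == ',']
--       breakIndex = quoteIndent+8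
--     else:
--       breakIndex = quoteIndent+1
--
--     if len(indentedLine) > maxColumns:
--       # we need to split it
--       newLines = []
--       words = indentedLine.strip().split()
--       words.insert(0," "*(quoteIndent))
--       lineToAdd = ""
--       for i, word in enumerate(words):
--         if len(lineToAdd+word)+3  < maxColumns:
--           lineToAdd = lineToAdd +" "+word
--         else:
--           newLines.append(lineToAdd+"\n")
--           lineToAdd = " "*breakIndex+" "+word
--         if i == len(words)-1:
--           newLines.append(lineToAdd+"\n")
--       outputLines+=newLines
--     else:
--       outputLines.append(line)
--   outputLines.append(" "*quoteIndent+'"""'+"\n")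
--   # Return a single string:
--   return outputLines
-- ===== SOURCE B (Python) =====
-- def trimQuoteDocstring(docstring, quoteIndent, maxColumns=120):
--   quote = " " * quoteIndent + '"""' + "\n"
--   return ([quote]
--           + [out for line in docstring
--                  for out in _formatLine(line, quoteIndent, maxColumns)]
--           + [quote])
--
-- def _formatLine(line, qi, mc):
--   line = line.expandtabs()
--   low = line.lower()
--   directive = line.strip().startswith("@") and any(
--       tag in low for tag in ("@ in", "@in", "@ out", "@out"))
--   indented = " " * (qi + 2) + line.lstrip()
--   if directive:
--     indented = indented.replace("@Out", "@ Out").replace("@In", "@ In")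
--   if len(indented) <= mc:
--     return [line]
--   breakIndex = qi + 8 if directive else qi + 1
--   return _wrap([" " * qi] + indented.strip().split(), "", breakIndex, mc)
--
-- def _wrap(words, cur, bi, mc):
--   if not words:
--     return [cur + "\n"]
--   w, rest = words[0], words[1:]
--   if len(cur + w) + 3 < mc:
--     return _wrap(rest, cur + " " + w, bi, mc)
--   return [cur + "\n"] + _wrap(rest, " " * bi + " " + w, bi, mc)
-- ===== Notes on version B (the rewrite author's own statement) =====
-- stated objective: simpler
-- what changed: B replaces A's imperative two-pass design (an index-building pass plus a `cnt in inIndex+outIndex` membership test and a mutated accumulator with an i==len(words)-1 flush flag) by a single functional pass: a flat comprehension over a pure per-line function whose wrapping is a recursive chunker that emits each finished line as it recurses, with no accumulator list and no last-word test.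
import Mathlib
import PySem

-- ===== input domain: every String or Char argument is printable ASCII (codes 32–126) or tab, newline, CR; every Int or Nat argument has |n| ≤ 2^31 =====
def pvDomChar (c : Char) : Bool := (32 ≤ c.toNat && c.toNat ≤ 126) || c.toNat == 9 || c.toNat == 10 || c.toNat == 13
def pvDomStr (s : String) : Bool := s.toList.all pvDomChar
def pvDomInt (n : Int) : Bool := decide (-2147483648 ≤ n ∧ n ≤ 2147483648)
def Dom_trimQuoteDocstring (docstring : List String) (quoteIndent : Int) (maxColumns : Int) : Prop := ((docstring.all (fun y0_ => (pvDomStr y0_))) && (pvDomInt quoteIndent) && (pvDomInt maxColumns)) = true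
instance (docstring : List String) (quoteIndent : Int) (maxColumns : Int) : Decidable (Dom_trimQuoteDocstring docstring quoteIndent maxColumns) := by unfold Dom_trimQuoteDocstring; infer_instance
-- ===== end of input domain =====

-- B is a single functional pass (flat map of a pure per-line formatter, wrapping by a recursive
-- chunker) replacing A's two imperative passes with index lists and mutated accumulators (objective: simpler).

-- shared low-level helpers (both Pythons call the same built-ins)
-- " " * n  (Python: negative n gives "")
def pvSpaces (n : Int) : List Char := List.replicate n.toNat ' '

-- str.expandtabs() with the default tabsize 8; hand-ported (not in PySem), exact for tabsize 8:
-- '\t' fills spaces to the next multiple of 8, '\n'/'\r' reset the column, others advance it.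
def pvExpandTabs : List Char → Nat → List Char
  | [], _ => []
  | c :: rest, col =>
    if c = '\t' then
      List.replicate (8 - col % 8) ' ' ++ pvExpandTabs rest (col + (8 - col % 8))
    else if c = '\n' || c = '\r' then c :: pvExpandTabs rest 0
    else c :: pvExpandTabs rest (col + 1)

-- '"@ in" in line.lower() or "@in" in line.lower()' / the same for out
def pvIsInDir (low : List Char) : Bool :=
  PySem.Chars.isIn "@ in".toList low || PySem.Chars.isIn "@in".toList low
def pvIsOutDir (low : List Char) : Bool :=
  PySem.Chars.isIn "@ out".toList low || PySem.Chars.isIn "@out".toList low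

-- ===== PORT A =====
-- first loop: build inIndex / outIndex
def pvIndexPass : List (List Char) → Int → List Int → List Int → List Int × List Int
  | [], _, inI, outI => (inI, outI)
  | l :: rest, cnt, inI, outI =>
    if PySem.Chars.startswith (PySem.Chars.strip l) ['@'] then
      if pvIsInDir (PySem.Chars.lower l) then pvIndexPass rest (cnt + 1) (inI ++ [cnt]) outI
      else if pvIsOutDir (PySem.Chars.lower l) then pvIndexPass rest (cnt + 1) inI (outI ++ [cnt])
      else pvIndexPass rest (cnt + 1) inI outI
    else pvIndexPass rest (cnt + 1) inI outI

-- inner word-wrapping loop of A: 'for i, word in enumerate(words): … if i == len(words)-1: append'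
def pvWrapA : List (List Char) → List (List Char) → List Char → Int → Int → List (List Char)
  | [], newLines, _, _, _ => newLines
  | [w], newLines, cur, bi, mc =>          -- last word: 'if i == len(words)-1' also appends
    let st := if ((cur ++ w).length : Int) + 3 < mc
              then (newLines, cur ++ ' ' :: w)
              else (newLines ++ [cur ++ ['\n']], pvSpaces bi ++ ' ' :: w)
    st.1 ++ [st.2 ++ ['\n']]
  | w :: w2 :: rest, newLines, cur, bi, mc =>
    let st := if ((cur ++ w).length : Int) + 3 < mc
              then (newLines, cur ++ ' ' :: w)
              else (newLines ++ [cur ++ ['\n']], pvSpaces bi ++ ' ' :: w)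
    pvWrapA (w2 :: rest) st.1 st.2 bi mc

-- body of A's second loop for one (cnt, line)
def pvLineA (inOut : List Int) (qi mc cnt : Int) (l : List Char) : List (List Char) :=
  let indented0 := pvSpaces (qi + 2) ++ PySem.Chars.lstrip l
  let p := if inOut.contains cnt then
             (PySem.Chars.replace (PySem.Chars.replace indented0 "@Out".toList "@ Out".toList)
                "@In".toList "@ In".toList, qi + 8)
           else (indented0, qi + 1)
  if (p.1.length : Int) > mc then
    pvWrapA (pvSpaces qi :: PySem.Chars.split₀ (PySem.Chars.strip p.1)) [] [] p.2 mc
  else [l]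

-- A's second loop over enumerate(lines)
def pvMainA (inOut : List Int) (qi mc : Int) : List (List Char) → Int → List (List Char) → List (List Char)
  | [], _, acc => acc
  | l :: rest, cnt, acc => pvMainA inOut qi mc rest (cnt + 1) (acc ++ pvLineA inOut qi mc cnt l)

def trimQuoteDocstring (docstring : List String) (quoteIndent : Int) (maxColumns : Int) : List String :=
  let lines := docstring.map (fun s => pvExpandTabs s.toList 0)
  let idx := pvIndexPass lines 0 [] []
  let quote := pvSpaces quoteIndent ++ '"' :: '"' :: '"' :: ['\n']
  (pvMainA (idx.1 ++ idx.2) quoteIndent maxColumns lines 0 [quote] ++ [quote]).map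
    (fun l => String.ofList l)

-- ===== PORT B =====
-- B's recursive chunker: emits each finished line as it recurses; no accumulator list
def pvWrapB : List (List Char) → List Char → Int → Int → List (List Char)
  | [], cur, _, _ => [cur ++ ['\n']]
  | w :: rest, cur, bi, mc =>
    if ((cur ++ w).length : Int) + 3 < mc then pvWrapB rest (cur ++ ' ' :: w) bi mc
    else (cur ++ ['\n']) :: pvWrapB rest (pvSpaces bi ++ ' ' :: w) bi mc

-- _formatLine of Source B: a pure per-line function
def pvLineB (qi mc : Int) (raw : List Char) : List (List Char) :=
  let l := pvExpandTabs raw 0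
  let low := PySem.Chars.lower l
  let directive := PySem.Chars.startswith (PySem.Chars.strip l) ['@'] &&
    (pvIsInDir low || pvIsOutDir low)
  let indented0 := pvSpaces (qi + 2) ++ PySem.Chars.lstrip l
  let indented := if directive then
      PySem.Chars.replace (PySem.Chars.replace indented0 "@Out".toList "@ Out".toList)
        "@In".toList "@ In".toList
    else indented0
  if (indented.length : Int) ≤ mc then [l]
  else
    let bi := if directive then qi + 8 else qi + 1
    pvWrapB (pvSpaces qi :: PySem.Chars.split₀ (PySem.Chars.strip indented)) [] bi mc

def trimQuoteDocstring_alt (docstring : List String) (quoteIndent : Int) (maxColumns : Int) : List String :=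
  let quote := pvSpaces quoteIndent ++ '"' :: '"' :: '"' :: ['\n']
  ([quote] ++ docstring.flatMap (fun s => pvLineB quoteIndent maxColumns s.toList) ++ [quote]).map
    (fun l => String.ofList l)

-- ===== PRECONDITION & SPEC =====
def Spec_trimQuoteDocstring (docstring : List String) (quoteIndent : Int) (maxColumns : Int) (out : List String) : Prop := out = trimQuoteDocstring_alt docstring quoteIndent maxColumns
instance (docstring : List String) (quoteIndent : Int) (maxColumns : Int) (out : List String) : Decidable (Spec_trimQuoteDocstring docstring quoteIndent maxColumns out) := by unfold Spec_trimQuoteDocstring; infer_instance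

-- ===== CLAIM (what is proved, stated in full; the proofs are below) =====
def Claim_equal_trimQuoteDocstring : Prop := ∀ (docstring : List String) (quoteIndent : Int) (maxColumns : Int), Dom_trimQuoteDocstring docstring quoteIndent maxColumns → Spec_trimQuoteDocstring docstring quoteIndent maxColumns (trimQuoteDocstring docstring quoteIndent maxColumns)

-- ===== LEMMAS AND PROOFS =====

-- the directive test of B, as a named predicate for the proofs
def pvDirective (l : List Char) : Bool :=
  PySem.Chars.startswith (PySem.Chars.strip l) ['@'] &&
    (pvIsInDir (PySem.Chars.lower l) || pvIsOutDir (PySem.Chars.lower l))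

-- the two per-line tests of A's first loop
def pvP1 (l : List Char) : Bool :=
  PySem.Chars.startswith (PySem.Chars.strip l) ['@'] && pvIsInDir (PySem.Chars.lower l)
def pvP2 (l : List Char) : Bool :=
  PySem.Chars.startswith (PySem.Chars.strip l) ['@'] && !pvIsInDir (PySem.Chars.lower l) &&
    pvIsOutDir (PySem.Chars.lower l)

def pvInSpec (ls : List (List Char)) (s : Int) : List Int :=
  ((PySem.List.enumerate ls s).filter (fun p => pvP1 p.2)).map (·.1)
def pvOutSpec (ls : List (List Char)) (s : Int) : List Int :=
  ((PySem.List.enumerate ls s).filter (fun p => pvP2 p.2)).map (·.1)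

theorem pvIndexPass_eq (ls : List (List Char)) : ∀ (s : Int) (i0 o0 : List Int),
    pvIndexPass ls s i0 o0 = (i0 ++ pvInSpec ls s, o0 ++ pvOutSpec ls s) := by
  induction ls with
  | nil => intro s i0 o0; simp [pvIndexPass, pvInSpec, pvOutSpec, PySem.List.enumerate_nil]
  | cons a t ih =>
    intro s i0 o0
    by_cases hsw : PySem.Chars.startswith (PySem.Chars.strip a) ['@'] = true <;>
    by_cases hin : pvIsInDir (PySem.Chars.lower a) = true <;>
    by_cases hout : pvIsOutDir (PySem.Chars.lower a) = true <;>
      simp [pvIndexPass, pvInSpec, pvOutSpec, PySem.List.enumerate_cons, pvP1, pvP2,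
        hsw, hin, hout, ih]

theorem pvSpec_ge (ls : List (List Char)) (s : Int) (f : Int × List Char → Bool) :
    ∀ c ∈ ((PySem.List.enumerate ls s).filter f).map (·.1), s ≤ c := by
  intro c hc
  have h1 : c ∈ (PySem.List.enumerate ls s).map (·.1) := by
    rcases List.mem_map.1 hc with ⟨p, hp, rfl⟩
    exact List.mem_map_of_mem (List.mem_of_mem_filter hp)
  rw [PySem.List.map_fst_enumerate] at h1
  exact (PySem.List.mem_pyRange_one.1 h1).1

theorem pvFst_ge {α : Type} {ls : List α} {s c : Int} {l : α}
    (h : (c, l) ∈ PySem.List.enumerate ls s) : s ≤ c := by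
  have h1 : c ∈ (PySem.List.enumerate ls s).map (·.1) := List.mem_map_of_mem h
  rw [PySem.List.map_fst_enumerate] at h1
  exact (PySem.List.mem_pyRange_one.1 h1).1

theorem pvContains_spec (ls : List (List Char)) : ∀ (s c : Int) (l : List Char),
    (c, l) ∈ PySem.List.enumerate ls s →
    (pvInSpec ls s ++ pvOutSpec ls s).contains c = pvDirective l := by
  induction ls with
  | nil => intro s c l h; simp [PySem.List.enumerate_nil] at h
  | cons a t ih =>
    intro s c l h
    rw [PySem.List.enumerate_cons] at h
    rcases List.mem_cons.1 h with heq | htl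
    · rw [Prod.mk.injEq] at heq
      obtain ⟨rfl, rfl⟩ := heq
      have hni : (pvInSpec t (c + 1)).contains c = false := by
        simp only [List.contains_eq_mem, decide_eq_false_iff_not]
        intro hmem; have := pvSpec_ge t (c + 1) _ c hmem; omega
      have hno : (pvOutSpec t (c + 1)).contains c = false := by
        simp only [List.contains_eq_mem, decide_eq_false_iff_not]
        intro hmem; have := pvSpec_ge t (c + 1) _ c hmem; omega
      simp only [pvInSpec, pvOutSpec, PySem.List.enumerate_cons, List.filter_cons] at hni hno ⊢
      cases hsw : PySem.Chars.startswith (PySem.Chars.strip l) ['@'] <;>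
      cases hin : pvIsInDir (PySem.Chars.lower l) <;>
      cases hout : pvIsOutDir (PySem.Chars.lower l) <;>
        simp_all [pvP1, pvP2, pvDirective]
    · have hcs : s + 1 ≤ c := pvFst_ge htl
      have hne : ¬ c = s := by omega
      have hIH := ih (s + 1) c l htl
      rw [← hIH]
      simp only [pvInSpec, pvOutSpec, PySem.List.enumerate_cons, List.filter_cons]
      cases hp1 : pvP1 (s, a).2 <;> cases hp2 : pvP2 (s, a).2 <;>
        simp [List.contains_eq_mem, List.mem_append, List.mem_cons, hne,
          decide_eq_decide]
      simp_all [pvP1, pvP2, Bool.and_eq_true]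

theorem pvWrap_eq : ∀ (ws : List (List Char)) (_ : ws ≠ []) (nls : List (List Char))
    (cur : List Char) (bi mc : Int),
    pvWrapA ws nls cur bi mc = nls ++ pvWrapB ws cur bi mc := by
  intro ws
  induction ws with
  | nil => intro h; exact absurd rfl h
  | cons w rest ih =>
    intro _ nls cur bi mc
    by_cases hc : ((cur ++ w).length : Int) + 3 < mc
    · cases rest with
      | nil => simp only [pvWrapA, pvWrapB, if_pos hc]
      | cons w2 r2 =>
        rw [show pvWrapA (w :: w2 :: r2) nls cur bi mc =
              pvWrapA (w2 :: r2) nls (cur ++ ' ' :: w) bi mc from by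
            simp only [pvWrapA, if_pos hc]]
        rw [show pvWrapB (w :: w2 :: r2) cur bi mc =
              pvWrapB (w2 :: r2) (cur ++ ' ' :: w) bi mc from by
            simp only [pvWrapB, if_pos hc]]
        exact ih (by simp) _ _ _ _
    · cases rest with
      | nil => simp only [pvWrapA, pvWrapB, if_neg hc]; simp
      | cons w2 r2 =>
        rw [show pvWrapA (w :: w2 :: r2) nls cur bi mc =
              pvWrapA (w2 :: r2) (nls ++ [cur ++ ['\n']]) (pvSpaces bi ++ ' ' :: w) bi mc from by
            simp only [pvWrapA, if_neg hc]]
        rw [ih (by simp)]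
        rw [show pvWrapB (w :: w2 :: r2) cur bi mc =
              (cur ++ ['\n']) :: pvWrapB (w2 :: r2) (pvSpaces bi ++ ' ' :: w) bi mc from by
            simp only [pvWrapB, if_neg hc]]
        simp

theorem pvIf_eq (L l : List Char) (qi bi mc : Int) :
    (if (L.length : Int) > mc then
        pvWrapA (pvSpaces qi :: PySem.Chars.split₀ (PySem.Chars.strip L)) [] [] bi mc
      else [l]) =
    (if (L.length : Int) ≤ mc then [l]
      else pvWrapB (pvSpaces qi :: PySem.Chars.split₀ (PySem.Chars.strip L)) [] bi mc) := by
  rcases lt_or_ge mc (L.length : Int) with hl | hl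
  · rw [if_pos (by omega), if_neg (by omega)]
    simpa using pvWrap_eq _ (by simp) [] [] bi mc
  · rw [if_neg (by omega), if_pos (by omega)]

theorem pvLine_eq (inOut : List Int) (qi mc c : Int) (raw : List Char)
    (h : inOut.contains c = pvDirective (pvExpandTabs raw 0)) :
    pvLineA inOut qi mc c (pvExpandTabs raw 0) = pvLineB qi mc raw := by
  simp only [pvLineA, pvLineB]
  rw [h]
  simp only [pvDirective]
  by_cases hD : (PySem.Chars.startswith (PySem.Chars.strip (pvExpandTabs raw 0)) ['@'] &&
      (pvIsInDir (PySem.Chars.lower (pvExpandTabs raw 0)) ||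
        pvIsOutDir (PySem.Chars.lower (pvExpandTabs raw 0)))) = true
  · simp only [if_pos hD]
    exact pvIf_eq _ _ _ _ _
  · simp only [if_neg hD]
    exact pvIf_eq _ _ _ _ _

theorem pvMain_eq (inOut : List Int) (qi mc : Int) : ∀ (ds : List String) (s : Int)
    (acc : List (List Char)),
    (∀ c l, (c, l) ∈ PySem.List.enumerate (ds.map (fun x => pvExpandTabs x.toList 0)) s →
      inOut.contains c = pvDirective l) →
    pvMainA inOut qi mc (ds.map (fun x => pvExpandTabs x.toList 0)) s acc =
      acc ++ ds.flatMap (fun x => pvLineB qi mc x.toList) := by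
  intro ds
  induction ds with
  | nil => intro s acc _; simp [pvMainA]
  | cons d t ih =>
    intro s acc h
    simp only [List.map_cons, pvMainA, List.flatMap_cons]
    rw [pvLine_eq inOut qi mc s d.toList
      (h s _ (by simp [List.map_cons, PySem.List.enumerate_cons]))]
    rw [ih (s + 1) _ (fun c l hm => h c l (by
      simp only [List.map_cons, PySem.List.enumerate_cons]
      exact List.mem_cons_of_mem _ hm))]
    simp

-- ===== VERDICT (by name: the statement is the Claim_ definition above) =====
theorem trimQuoteDocstring_spec : Claim_equal_trimQuoteDocstring := by
  intro docstring qi mc _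
  unfold Spec_trimQuoteDocstring trimQuoteDocstring trimQuoteDocstring_alt
  simp only
  rw [pvIndexPass_eq]
  simp only [List.nil_append]
  rw [pvMain_eq _ qi mc docstring 0 _ (fun c l hm => pvContains_spec _ 0 c l hm)]
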